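-- pv_equiv track=rewrite | github.com/Ananta-dot/PB_POC | motifs.py | motif_zipper
-- ===== SOURCE A (Python) =====
-- from typing import List, Tuple
--
-- Seq  = List[int]
--
-- def motif_zipper(n: int) -> Seq:
--     # [1,n,1,n, 2,n-1,2,n-1, ...]
--     out=[]
--     for i in range(1, (n//2)+1):
--         j = n - i + 1
--         out += [i, j, i, j]
--     if n % 2 == 1:
--         k = (n//2)+1
--         out += [k,k]
--     return out[:2*n]
-- ===== SOURCE B (Python) =====
-- from typing import List
--
-- Seq = List[int]
--
-- def motif_zipper(n: int) -> Seq: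
--     # per-position closed form over all 2n indices; no block loop, no odd-n tail
--     return [(m // 4 + 1) if m % 4 in (0, 2) else (n - m // 4) for m in range(2 * n)]
-- ===== Notes on version B (the rewrite author's own statement) =====
-- stated objective: simpler
-- what changed: Replaces A's block-by-block accumulation (a loop over n//2 blocks appending [i,j,i,j], an odd-n tail append, and a final truncating slice) with a single per-index closed form: element m of range(2n) is m//4+1 when m%4 is 0 or 2, else n-m//4; no special case and no slice needed.
import Mathlib
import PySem

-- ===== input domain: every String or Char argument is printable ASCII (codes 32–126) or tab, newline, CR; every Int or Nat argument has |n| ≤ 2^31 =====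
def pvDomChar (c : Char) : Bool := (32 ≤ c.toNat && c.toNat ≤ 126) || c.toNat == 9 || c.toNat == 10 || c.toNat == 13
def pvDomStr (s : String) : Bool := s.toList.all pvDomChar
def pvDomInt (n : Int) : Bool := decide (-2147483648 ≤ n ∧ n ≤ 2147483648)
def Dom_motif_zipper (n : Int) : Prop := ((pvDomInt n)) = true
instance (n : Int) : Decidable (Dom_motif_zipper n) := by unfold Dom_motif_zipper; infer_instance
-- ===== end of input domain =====

-- ===== PORT A =====
-- A: block loop over i = 1 .. n//2 appending [i, j, i, j], odd-n tail [k, k], then out[:2n]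
def motif_zipper (n : Int) : List Int :=
  let out : List Int :=
    (PySem.List.pyRange 1 (PySem.Int.floordiv n 2 + 1) 1).foldl
      (fun out i => out ++ [i, n - i + 1, i, n - i + 1]) []
  let out2 : List Int :=
    if PySem.Int.mod n 2 = 1 then
      out ++ [PySem.Int.floordiv n 2 + 1, PySem.Int.floordiv n 2 + 1]
    else out
  PySem.List.slice out2 none (some (2 * n))

-- ===== PORT B =====
-- B: per-index closed form over range(2n); no block loop, no odd-n special case, no slice
def motif_zipper_alt (n : Int) : List Int :=
  (PySem.List.pyRange 0 (2 * n) 1).map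
    (fun m =>
      if PySem.Int.mod m 4 = 0 ∨ PySem.Int.mod m 4 = 2 then
        PySem.Int.floordiv m 4 + 1
      else n - PySem.Int.floordiv m 4)

-- ===== PRECONDITION & SPEC =====
def Spec_motif_zipper (n : Int) (out : List Int) : Prop := out = motif_zipper_alt n
instance (n : Int) (out : List Int) : Decidable (Spec_motif_zipper n out) := by unfold Spec_motif_zipper; infer_instance

-- ===== CLAIM (what is proved, stated in full; the proofs are below) =====
def Claim_equal_motif_zipper : Prop := ∀ (n : Int), Dom_motif_zipper n → Spec_motif_zipper n (motif_zipper n)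

-- ===== LEMMAS AND PROOFS =====

-- slicing xs[:b] with b ≤ -len(xs) yields []
theorem slice_to_nonpos (xs : List Int) (b : Int) (hb : b + xs.length ≤ 0) :
    PySem.List.slice xs none (some b) = [] := by
  simp [PySem.List.slice, PySem.List.clampIdx]
  split_ifs <;> simp_all <;> omega

-- value of B's per-index formula at the four positions of block h
theorem g_val0 (n h : Int) :
    (if PySem.Int.mod (4*h) 4 = 0 ∨ PySem.Int.mod (4*h) 4 = 2 then PySem.Int.floordiv (4*h) 4 + 1
     else n - PySem.Int.floordiv (4*h) 4) = h + 1 := by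
  rw [PySem.Int.mod_eq_emod_of_pos (show (0:Int) < 4 by omega), PySem.Int.floordiv_eq_ediv_of_pos (show (0:Int) < 4 by omega)]
  simp [Int.mul_emod_right]

theorem g_val1 (n h : Int) :
    (if PySem.Int.mod (4*h+1) 4 = 0 ∨ PySem.Int.mod (4*h+1) 4 = 2 then PySem.Int.floordiv (4*h+1) 4 + 1
     else n - PySem.Int.floordiv (4*h+1) 4) = n - h := by
  rw [PySem.Int.mod_eq_emod_of_pos (show (0:Int) < 4 by omega), PySem.Int.floordiv_eq_ediv_of_pos (show (0:Int) < 4 by omega)]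
  have h1 : (4*h+1) % 4 = 1 := by omega
  have h2 : (4*h+1) / 4 = h := by omega
  simp [h1, h2]

theorem g_val2 (n h : Int) :
    (if PySem.Int.mod (4*h+2) 4 = 0 ∨ PySem.Int.mod (4*h+2) 4 = 2 then PySem.Int.floordiv (4*h+2) 4 + 1
     else n - PySem.Int.floordiv (4*h+2) 4) = h + 1 := by
  rw [PySem.Int.mod_eq_emod_of_pos (show (0:Int) < 4 by omega), PySem.Int.floordiv_eq_ediv_of_pos (show (0:Int) < 4 by omega)]
  have h1 : (4*h+2) % 4 = 2 := by omega
  have h2 : (4*h+2) / 4 = h := by omega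
  simp [h1, h2]

theorem g_val3 (n h : Int) :
    (if PySem.Int.mod (4*h+3) 4 = 0 ∨ PySem.Int.mod (4*h+3) 4 = 2 then PySem.Int.floordiv (4*h+3) 4 + 1
     else n - PySem.Int.floordiv (4*h+3) 4) = n - h := by
  rw [PySem.Int.mod_eq_emod_of_pos (show (0:Int) < 4 by omega), PySem.Int.floordiv_eq_ediv_of_pos (show (0:Int) < 4 by omega)]
  have h1 : (4*h+3) % 4 = 3 := by omega
  have h2 : (4*h+3) / 4 = h := by omega
  simp [h1, h2]

-- A's block loop over 1..h equals B's per-index map over 0..4h-1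
theorem blocks_eq (n : Int) (h : Nat) :
    (PySem.List.pyRange 1 ((h : Int) + 1) 1).foldl
        (fun out i => out ++ [i, n - i + 1, i, n - i + 1]) []
      = (PySem.List.pyRange 0 (4 * (h : Int)) 1).map
          (fun m =>
            if PySem.Int.mod m 4 = 0 ∨ PySem.Int.mod m 4 = 2 then
              PySem.Int.floordiv m 4 + 1
            else n - PySem.Int.floordiv m 4) := by
  induction h with
  | zero => simp [PySem.List.pyRange_one_eq_nil]
  | succ k ih =>
    have hL : PySem.List.pyRange 1 ((k : Int) + 1 + 1) 1
        = PySem.List.pyRange 1 ((k : Int) + 1) 1 ++ [(k : Int) + 1] := by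
      have := PySem.List.pyRange_one_succ_right (by omega : (1:Int) ≤ (k:Int)+1)
      simpa using this
    have hR : PySem.List.pyRange 0 (4 * ((k : Int) + 1)) 1
        = PySem.List.pyRange 0 (4 * (k : Int)) 1
          ++ [4 * (k : Int), 4 * (k : Int) + 1, 4 * (k : Int) + 2, 4 * (k : Int) + 3] := by
      rw [PySem.List.pyRange_one_append 0 (4 * (k : Int)) (4 * ((k : Int) + 1)) (by omega) (by omega)]
      congr 1
      rw [show (4 * ((k : Int) + 1)) = (4 * (k : Int) + 3) + 1 by ring,
        PySem.List.pyRange_one_succ_right (by omega),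
        show (4 * (k : Int) + 3) = (4 * (k : Int) + 2) + 1 by ring,
        PySem.List.pyRange_one_succ_right (by omega),
        show (4 * (k : Int) + 2) = (4 * (k : Int) + 1) + 1 by ring,
        PySem.List.pyRange_one_succ_right (by omega),
        show (4 * (k : Int) + 1) = (4 * (k : Int)) + 1 by ring,
        PySem.List.pyRange_one_singleton]
      simp
    push_cast
    rw [hL, List.foldl_append, ih, hR, List.map_append]
    simp only [List.foldl_cons, List.foldl_nil, List.map_cons, List.map_nil]
    rw [g_val0, g_val1, g_val2, g_val3]
    have : n - ((k : Int) + 1) + 1 = n - (k : Int) := by ring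
    simp [this]

-- ===== VERDICT (by name: the statement is the Claim_ definition above) =====
theorem motif_zipper_spec : Claim_equal_motif_zipper := by
  intro n _
  unfold Spec_motif_zipper motif_zipper motif_zipper_alt
  by_cases hneg : n < 0
  · -- negative n: A's loop is empty, the slice [:2n] empties any tail; B's range is empty
    have hq : PySem.Int.floordiv n 2 + 1 ≤ 1 := by
      rw [PySem.Int.floordiv_eq_ediv_of_pos (show (0:Int) < 2 by omega)]; omega
    rw [PySem.List.pyRange_one_eq_nil hq, PySem.List.pyRange_one_eq_nil (by omega : 2*n ≤ 0)]
    simp only [List.foldl_nil, List.map_nil]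
    split_ifs with hm
    · exact slice_to_nonpos _ _ (by simp; omega)
    · exact slice_to_nonpos _ _ (by simp; omega)
  · push Not at hneg
    obtain ⟨k, hk⟩ : ∃ k : Nat, n = 2 * (k : Int) ∨ n = 2 * (k : Int) + 1 := by
      refine ⟨(n / 2).toNat, ?_⟩
      omega
    have hdiv : PySem.Int.floordiv n 2 = (k : Int) := by
      rw [PySem.Int.floordiv_eq_ediv_of_pos (show (0:Int) < 2 by omega)]; omega
    have hmod : PySem.Int.mod n 2 = if n = 2 * (k : Int) + 1 then 1 else 0 := by
      rw [PySem.Int.mod_eq_emod_of_pos (show (0:Int) < 2 by omega)]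
      rcases hk with hk | hk <;> subst hk <;> simp
    rw [hdiv, blocks_eq n k]
    rcases hk with hk | hk
    · -- even n = 2k: no tail, slice is the identity on a list of length 4k = 2n
      have hm0 : PySem.Int.mod n 2 = 0 := by rw [hmod]; simp [hk]
      dsimp only
      rw [if_neg (show ¬ PySem.Int.mod n 2 = 1 by rw [hm0]; omega)]
      rw [PySem.List.slice_to _ (by omega : (0:Int) ≤ 2*n)]
      subst hk
      rw [show (2 : Int) * (2 * (k:Int)) = 4 * (k:Int) by ring]
      apply List.take_of_length_le
      simp [PySem.List.length_pyRange_one]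
    · -- odd n = 2k+1: A's tail [k+1,k+1] is B's last two mapped indices 4k, 4k+1
      have hm1 : PySem.Int.mod n 2 = 1 := by rw [hmod]; simp [hk]
      dsimp only
      rw [if_pos hm1]
      rw [PySem.List.slice_to _ (by omega : (0:Int) ≤ 2*n)]
      have hsplit : PySem.List.pyRange 0 (2*n) 1
          = PySem.List.pyRange 0 (4 * (k:Int)) 1 ++ [4 * (k:Int), 4 * (k:Int) + 1] := by
        rw [PySem.List.pyRange_one_append 0 (4 * (k : Int)) (2 * n) (by omega) (by omega)]
        congr 1
        rw [show (2*n) = (4 * (k : Int) + 1) + 1 by omega,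
          PySem.List.pyRange_one_succ_right (by omega),
          show (4 * (k : Int) + 1) = (4 * (k : Int)) + 1 by ring,
          PySem.List.pyRange_one_singleton]
        simp
      rw [hsplit, List.map_append]
      simp only [List.map_cons, List.map_nil]
      rw [g_val0, g_val1]
      have hnk : n - (k : Int) = (k : Int) + 1 := by omega
      rw [hnk]
      apply List.take_of_length_le
      simp [PySem.List.length_pyRange_one]
      omega
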